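-- pv_equiv track=rewrite | github.com/daniel-reich/ubiquitous-fiesta | vuSXW3iEnEQNZXjAP_21.py | create_square
-- ===== SOURCE A (Python) =====
-- def create_square(length):
--   if not isinstance(length,int) or length<1:
--     return ''
--   ret = ''
--   if length>1:
--     ret+=('#'*length)+'\n'
--   for i in range(2,length):
--     ret+='#'+(' '*(length-2))+'#\n'
--   if length>0:
--     ret+='#'*length
--   return ret
-- ===== SOURCE B (Python) =====
-- def create_square(length):
--   if not isinstance(length, int) or length < 1:
--     return ''
--   return '\n'.join(
--     ''.join('#' if i == 0 or i == length - 1 or j == 0 or j == length - 1 else ' '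
--             for j in range(length))
--     for i in range(length))
-- ===== Notes on version B (the rewrite author's own statement) =====
-- stated objective: alternative
-- what changed: Replaces A's sequential string concatenation of precomputed row patterns (top row, repeated middle rows, bottom row) by a uniform n-by-n grid traversal that classifies each cell as border or interior and joins the rows with '\n'.
import Mathlib
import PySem

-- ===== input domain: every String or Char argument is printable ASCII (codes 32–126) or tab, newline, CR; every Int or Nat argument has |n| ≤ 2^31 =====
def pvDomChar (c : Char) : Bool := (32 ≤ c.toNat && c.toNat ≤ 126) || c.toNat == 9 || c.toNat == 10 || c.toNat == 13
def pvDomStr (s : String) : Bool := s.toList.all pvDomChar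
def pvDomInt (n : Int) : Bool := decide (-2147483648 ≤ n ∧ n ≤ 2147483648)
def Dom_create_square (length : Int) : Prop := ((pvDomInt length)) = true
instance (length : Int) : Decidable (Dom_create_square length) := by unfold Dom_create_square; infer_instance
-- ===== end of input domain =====

-- B replaces A's row-pattern concatenation by a per-cell border classification over an n×n grid
-- and '\n'.join of the rows (alternative decomposition, same asymptotic cost).

-- ===== PORT A =====
-- strings are ported on the List Char side (PySem.Chars); '#'*k is PySem.List.pyRepeat ['#'] k (exact)
def create_square (length : Int) : String :=
  if length < 1 then "" else
  let ret : List Char := []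
  let ret := if length > 1 then ret ++ PySem.List.pyRepeat ['#'] length ++ ['\n'] else ret
  let ret := (PySem.List.pyRange 2 length).foldl
      (fun r _ => r ++ ['#'] ++ PySem.List.pyRepeat [' '] (length - 2) ++ ['#', '\n']) ret
  let ret := if length > 0 then ret ++ PySem.List.pyRepeat ['#'] length else ret
  String.mk ret

-- ===== PORT B =====
-- ''.join over the per-cell generator is the inner map; '\n'.join is PySem.Chars.join ['\n']
def create_square_alt (length : Int) : String :=
  if length < 1 then "" else
  String.mk (PySem.Chars.join ['\n']
    ((PySem.List.pyRange 0 length).map (fun i =>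
      (PySem.List.pyRange 0 length).map (fun j =>
        if i = 0 ∨ i = length - 1 ∨ j = 0 ∨ j = length - 1 then '#' else ' '))))

-- ===== PRECONDITION & SPEC =====
def Spec_create_square (length : Int) (out : String) : Prop := out = create_square_alt length
instance (length : Int) (out : String) : Decidable (Spec_create_square length out) := by unfold Spec_create_square; infer_instance

-- ===== CLAIM (what is proved, stated in full; the proofs are below) =====
def Claim_equal_create_square : Prop := ∀ (length : Int), Dom_create_square length → Spec_create_square length (create_square length)

-- ===== LEMMAS AND PROOFS =====

-- the middle block: m copies of "#<sp spaces>#\n"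
def midBlock (sp : Nat) : Nat → List Char
  | 0 => []
  | m + 1 => ('#' :: List.replicate sp ' ' ++ ['#', '\n']) ++ midBlock sp m

lemma foldl_const_append {α : Type} (c : List Char) :
    ∀ (l : List α) (r : List Char),
      l.foldl (fun r _ => r ++ c) r = r ++ (List.replicate l.length c).flatten := by
  intro l
  induction l with
  | nil => simp [List.foldl]
  | cons x xs ih => intro r; simp [List.foldl, ih, List.replicate_succ]

lemma flatten_replicate_mid (sp m : Nat) :
    (List.replicate m ('#' :: List.replicate sp ' ' ++ ['#', '\n'])).flatten = midBlock sp m := by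
  induction m with
  | zero => simp [midBlock]
  | succ m ih =>
      simp only [List.replicate_succ, List.flatten_cons, midBlock]
      rw [ih]

-- A's value for n = m+2
lemma create_square_big (m : Nat) :
    create_square ((m : Int) + 2) =
      String.mk (List.replicate (m + 2) '#' ++ '\n' :: (midBlock m m ++ List.replicate (m + 2) '#')) := by
  have h1 : ¬ ((m : Int) + 2 < 1) := by omega
  have h2 : (m : Int) + 2 > 1 := by omega
  have h3 : (m : Int) + 2 > 0 := by omega
  simp only [create_square, h1, h2, h3, if_false, if_true,
    PySem.List.pyRepeat_singleton]
  have hlen : (PySem.List.pyRange 2 ((m : Int) + 2)).length = m := by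
    rw [PySem.List.length_pyRange_one]; omega
  have hm2 : ((m : Int) + 2).toNat = m + 2 := by omega
  have hsp : ((m : Int) + 2 - 2).toNat = m := by omega
  rw [show (fun (r : List Char) (_ : Int) =>
        r ++ ['#'] ++ List.replicate ((m : Int) + 2 - 2).toNat ' ' ++ ['#', '\n'])
      = fun (r : List Char) (_ : Int) =>
        r ++ ('#' :: (List.replicate ((m : Int) + 2 - 2).toNat ' ' ++ ['#', '\n']))
    from funext fun r => funext fun _ => by simp]
  rw [foldl_const_append, hlen, hm2, hsp]
  have hre : List.replicate m ('#' :: (List.replicate m ' ' ++ ['#', '\n'])) =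
      List.replicate m ('#' :: List.replicate m ' ' ++ ['#', '\n']) := by simp
  rw [hre, flatten_replicate_mid]
  simp

lemma join_cons_of_ne_nil (sep p : List Char) (l : List (List Char)) (h : l ≠ []) :
    PySem.Chars.join sep (p :: l) = p ++ sep ++ PySem.Chars.join sep l := by
  cases l with
  | nil => exact absurd rfl h
  | cons q rest => exact PySem.Chars.join_cons_cons sep p q rest

lemma join_replicate_append (sep a b : List Char) :
    ∀ m : Nat, PySem.Chars.join sep (List.replicate m a ++ [b]) =
      (List.replicate m (a ++ sep)).flatten ++ b := by
  intro m
  induction m with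
  | zero => simp [PySem.Chars.join_singleton]
  | succ m ih =>
      rw [List.replicate_succ, List.cons_append,
        join_cons_of_ne_nil sep a _ (by simp), ih]
      simp [List.replicate_succ]

-- generic: a map over pyRange 0 (m+2) splits into first element, m middle elements, last element
lemma map_range_split {A : Type} (f : Int → A) (m : Nat) :
    (PySem.List.pyRange 0 ((m : Int) + 2)).map f
      = f 0 :: ((List.range m).map (fun (k : Nat) => f ((k : Int) + 1)) ++ [f ((m : Int) + 1)]) := by
  have hr : List.range (m+2) = 0 :: (List.map Nat.succ (List.range m) ++ [m+1]) := by
    rw [List.range_succ_eq_map, List.range_succ, List.map_append]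
    rfl
  rw [show ((m : Int) + 2) = ((m + 2 : Nat) : Int) by push_cast; ring,
    PySem.List.pyRange_zero_natCast, List.map_map, hr]
  simp only [List.map_cons, List.map_append]
  refine congrArg₂ _ rfl (congrArg₂ _ ?_ ?_)
  · rw [List.map_map]
    apply List.map_congr_left
    intro k _
    show f ((k + 1 : Nat) : Int) = f ((k : Int) + 1)
    congr 1
  · show [f ((m + 1 : Nat) : Int)] = [f ((m : Int) + 1)]
    congr 2

lemma row_border (m : Nat) (i : Int) (hi : i = 0 ∨ i = (m : Int) + 2 - 1) :
    (PySem.List.pyRange 0 ((m : Int) + 2)).map (fun j =>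
        if i = 0 ∨ i = (m : Int) + 2 - 1 ∨ j = 0 ∨ j = (m : Int) + 2 - 1 then '#' else ' ')
      = List.replicate (m + 2) '#' := by
  rw [List.eq_replicate_iff]
  constructor
  · rw [List.length_map, PySem.List.length_pyRange_one]; omega
  · intro b hb
    simp only [List.mem_map] at hb
    obtain ⟨j, _, hj⟩ := hb
    rcases hi with h | h <;> simp [h] at hj <;> exact hj.symm

lemma row_interior (m : Nat) (i : Int) (h0 : i ≠ 0) (h1 : i ≠ (m : Int) + 2 - 1) :
    (PySem.List.pyRange 0 ((m : Int) + 2)).map (fun j =>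
        if i = 0 ∨ i = (m : Int) + 2 - 1 ∨ j = 0 ∨ j = (m : Int) + 2 - 1 then '#' else ' ')
      = '#' :: (List.replicate m ' ' ++ ['#']) := by
  rw [map_range_split]
  congr 1
  · rw [if_pos]; right; right; left; rfl
  congr 1
  · rw [List.eq_replicate_iff]
    refine ⟨by simp, ?_⟩
    intro b hb
    simp only [List.mem_map, List.mem_range] at hb
    obtain ⟨k, hk, hkeq⟩ := hb
    rw [if_neg] at hkeq
    · exact hkeq.symm
    · push_neg
      refine ⟨h0, h1, by omega, by omega⟩
  · rw [if_pos]; right; right; right; omega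

-- the full list of B's rows for n = m+2
lemma rows_eq (m : Nat) :
    (PySem.List.pyRange 0 ((m : Int) + 2)).map (fun i =>
      (PySem.List.pyRange 0 ((m : Int) + 2)).map (fun j =>
        if i = 0 ∨ i = (m : Int) + 2 - 1 ∨ j = 0 ∨ j = (m : Int) + 2 - 1 then '#' else ' '))
      = List.replicate (m + 2) '#' ::
          (List.replicate m ('#' :: (List.replicate m ' ' ++ ['#'])) ++ [List.replicate (m + 2) '#']) := by
  rw [map_range_split]
  congr 1
  · exact row_border m 0 (Or.inl rfl)
  congr 1
  · rw [List.eq_replicate_iff]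
    refine ⟨by simp, ?_⟩
    intro b hb
    simp only [List.mem_map, List.mem_range] at hb
    obtain ⟨k, hk, hkeq⟩ := hb
    rw [← hkeq]
    exact row_interior m ((k : Int) + 1) (by omega) (by omega)
  · exact congrArg (fun x => [x]) (row_border m ((m : Int) + 1) (Or.inr (by omega)))

-- B's value for n = m+2
lemma create_square_alt_big (m : Nat) :
    create_square_alt ((m : Int) + 2) =
      String.mk (List.replicate (m + 2) '#' ++ '\n' :: (midBlock m m ++ List.replicate (m + 2) '#')) := by
  have h1 : ¬ ((m : Int) + 2 < 1) := by omega
  rw [create_square_alt, if_neg h1, rows_eq,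
    join_cons_of_ne_nil _ _ _ (by simp), join_replicate_append]
  have : List.replicate m (('#' :: (List.replicate m ' ' ++ ['#'])) ++ ['\n']) =
      List.replicate m ('#' :: List.replicate m ' ' ++ ['#', '\n']) := by simp
  rw [this, flatten_replicate_mid]
  simp

-- ===== VERDICT (by name: the statement is the Claim_ definition above) =====
theorem create_square_spec : Claim_equal_create_square := by
  intro length _
  unfold Spec_create_square
  by_cases hlt : length < 1
  · simp [create_square, create_square_alt, hlt]
  · by_cases h1 : length = 1
    · subst h1; decide
    · have h2 : 2 ≤ length := by omega
      obtain ⟨m, hm⟩ : ∃ m : Nat, length = (m : Int) + 2 :=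
        ⟨(length - 2).toNat, by omega⟩
      subst hm
      rw [create_square_big, create_square_alt_big]
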